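-- pv_equiv track=rewrite | github.com/anna-jana/numerics-physics-stuff | parallel_boxes.py | most_equal_products
-- ===== SOURCE A (Python) =====
-- def most_equal_products(factors, n):
--     products = [1] * n
--     factors = sorted(factors)
--     i = 0
--     for f in factors:
--         products[i] *= f
--         i = (i + 1) % n
--     return products
-- ===== SOURCE B (Python) =====
-- def most_equal_products(factors, n):
--     factors = sorted(factors)
--     m = len(factors)
--     out = []
--     for i in range(n):
--         p = 1
--         j = i
--         while j < m:
--             p *= factors[j]
--             j += n
--         out.append(p)
--     return out
-- ===== Notes on version B (the rewrite author's own statement) =====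
-- stated objective: alternative
-- what changed: B builds each bucket independently by a strided scan over the sorted factors (indices i, i+n, i+2n, ...) instead of A's single interleaved pass that rotates a modular bucket index.
import Mathlib
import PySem

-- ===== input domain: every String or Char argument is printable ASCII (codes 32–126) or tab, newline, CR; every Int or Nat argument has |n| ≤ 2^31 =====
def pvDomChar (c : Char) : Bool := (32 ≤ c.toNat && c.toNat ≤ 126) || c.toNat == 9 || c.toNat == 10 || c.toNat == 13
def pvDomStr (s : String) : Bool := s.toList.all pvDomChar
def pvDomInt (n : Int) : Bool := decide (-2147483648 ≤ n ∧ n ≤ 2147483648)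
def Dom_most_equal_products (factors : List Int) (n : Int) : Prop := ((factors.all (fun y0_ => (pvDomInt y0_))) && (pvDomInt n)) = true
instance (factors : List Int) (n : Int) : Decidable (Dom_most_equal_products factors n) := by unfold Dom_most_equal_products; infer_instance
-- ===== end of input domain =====

-- B gathers each bucket by an independent strided scan over the sorted factors instead of A's
-- single interleaved pass with a rotating modular index; same asymptotic cost, different decomposition.


-- ===== PORT A =====
-- literal port: products = [1]*n ; for f in sorted(factors): products[i] *= f; i = (i+1) % n
-- (inside Pre_ the index i is always in range, so pyGet?/set are exact; (i+1) % n is Python fmod)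
def most_equal_products (factors : List Int) (n : Int) : List Int :=
  let products : List Int := List.replicate n.toNat 1   -- [1] * n  ([] for n ≤ 0, as in Python)
  let fs := PySem.List.sorted factors (fun x => x)
  (fs.foldl (fun (st : List Int × Int) f =>
      (st.1.set st.2.toNat (((PySem.List.pyGet? st.1 st.2).getD 0) * f),
       PySem.Int.mod (st.2 + 1) n))
    (products, 0)).1

-- ===== PORT B =====
-- while j < m: p *= factors[j]; j += n   — tail recursion; fuel = m bounds the iteration count
-- (never exhausted when n ≥ 1, since each step consumes a distinct index)
def pvStrideLoop (g : List Int) (n : Int) : Nat → Int → Int → Int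
  | 0, p, _ => p
  | fuel + 1, p, j =>
    if j < (g.length : Int) then
      pvStrideLoop g n fuel (p * ((PySem.List.pyGet? g j).getD 0)) (j + n)
    else p

def most_equal_products_alt (factors : List Int) (n : Int) : List Int :=
  let fs := PySem.List.sorted factors (fun x => x)
  (PySem.List.pyRange 0 n 1).map (fun i => pvStrideLoop fs n fs.length 1 i)

-- ===== PRECONDITION & SPEC =====
-- Pre_ excludes exactly the inputs on which A raises: nonempty factors with n ≤ 0
-- (ZeroDivisionError for n == 0, IndexError for n < 0).
def Pre_most_equal_products (factors : List Int) (n : Int) : Prop := factors = [] ∨ 1 ≤ n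
instance (factors : List Int) (n : Int) : Decidable (Pre_most_equal_products factors n) := by unfold Pre_most_equal_products; infer_instance
def pvWitness_most_equal_products : List Int × Int := ([6, 2, 5, 3], 2)

def Spec_most_equal_products (factors : List Int) (n : Int) (out : List Int) : Prop := out = most_equal_products_alt factors n
instance (factors : List Int) (n : Int) (out : List Int) : Decidable (Spec_most_equal_products factors n out) := by unfold Spec_most_equal_products; infer_instance

-- ===== CLAIM (what is proved, stated in full; the proofs are below) =====
def Claim_equal_most_equal_products : Prop := ∀ (factors : List Int) (n : Int), Dom_most_equal_products factors n → Pre_most_equal_products factors n → Spec_most_equal_products factors n (most_equal_products factors n)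

-- ===== LEMMAS AND PROOFS =====

-- bucket product of A's rotating pass: element at position k of g goes to bucket (i + k) % n'
def pvBp (n' : Nat) : List Int → Nat → Nat → Int
  | [], _, _ => 1
  | f :: g, i, j => (if i = j then f else 1) * pvBp n' g ((i + 1) % n') j

-- strided product: first element, then every n'-th element after it
def pvSP (n' : Nat) : List Int → Int
  | [] => 1
  | x :: xs => x * pvSP n' (xs.drop (n' - 1))
termination_by xs => xs.length
decreasing_by simp

theorem pvSP_nil (n' : Nat) : pvSP n' [] = 1 := by
  simp [pvSP]

theorem pvSP_cons (n' : Nat) (x : Int) (xs : List Int) :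
    pvSP n' (x :: xs) = x * pvSP n' (xs.drop (n' - 1)) := by
  simp [pvSP]

theorem pvBp_eq_SP (n' : Nat) (hn : 1 ≤ n') :
    ∀ (g : List Int) (i j d : Nat), i < n' → j < n' → d < n' →
      (i + d = j ∨ i + d = j + n') → pvBp n' g i j = pvSP n' (g.drop d) := by
  intro g
  induction g with
  | nil => intro i j d _ _ _ _; simp [pvBp, pvSP_nil]
  | cons f g ih =>
    intro i j d hi hj hd hdisj
    have hi' : (i + 1) % n' = if i + 1 = n' then 0 else i + 1 := by
      by_cases h : i + 1 = n'
      · simp [h]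
      · rw [if_neg h]
        exact Nat.mod_eq_of_lt (by omega)
    by_cases hij : i = j
    · -- head lands in bucket j; d must be 0
      have hd0 : d = 0 := by omega
      subst hd0; subst hij
      have : pvBp n' g ((i + 1) % n') i = pvSP n' (g.drop (n' - 1)) := by
        apply ih _ _ (n' - 1) _ hi (by omega)
        · rw [hi']; split <;> omega
        · rw [hi']; split <;> omega
      rw [pvBp, if_pos rfl, this, List.drop_zero, pvSP_cons]
    · -- head skipped; d ≥ 1, recurse with d - 1
      have hd1 : 1 ≤ d := by omega
      have : pvBp n' g ((i + 1) % n') j = pvSP n' (g.drop (d - 1)) := by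
        apply ih _ _ (d - 1) _ hj (by omega)
        · rw [hi']; split <;> omega
        · rw [hi']; split <;> omega
      rw [pvBp, if_neg hij, one_mul, this]
      obtain ⟨d', rfl⟩ : ∃ d', d = d' + 1 := ⟨d - 1, by omega⟩
      simp

theorem pvStrideLoop_spec (g : List Int) (n' : Nat) (hn : 1 ≤ n') :
    ∀ (fuel j : Nat) (p : Int), g.length ≤ j + fuel →
      pvStrideLoop g (n' : Int) fuel p (j : Int) = p * pvSP n' (g.drop j) := by
  intro fuel
  induction fuel with
  | zero =>
    intro j p hle
    rw [List.drop_eq_nil_of_le (by omega), pvSP_nil, mul_one]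
    rfl
  | succ fuel ih =>
    intro j p hle
    by_cases hjl : j < g.length
    · have hdrop : g.drop j = g[j] :: g.drop (j + 1) := List.drop_eq_getElem_cons hjl
      have hget : PySem.List.pyGet? g (j : Int) = some g[j] := by
        simp [hjl]
      have hcast : ((j : Int) + (n' : Int)) = ((j + n' : Nat) : Int) := by push_cast; ring
      rw [pvStrideLoop, if_pos (by exact_mod_cast hjl), hget]
      simp only [Option.getD_some]
      rw [hcast, ih (j + n') (p * g[j]) (by omega), hdrop, pvSP_cons]
      have : (g.drop (j + 1)).drop (n' - 1) = g.drop (j + n') := by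
        rw [List.drop_drop]; congr 1; omega
      rw [this]; ring
    · rw [pvStrideLoop, if_neg (by exact_mod_cast hjl),
        List.drop_eq_nil_of_le (by omega), pvSP_nil, mul_one]

theorem pvFmod_step (i n' : Nat) (hn : 1 ≤ n') :
    PySem.Int.mod ((i : Int) + 1) (n' : Int) = (((i + 1) % n' : Nat) : Int) := by
  unfold PySem.Int.mod
  rw [Int.fmod_eq_emod, if_pos (Or.inl (by positivity)), add_zero]
  have h1 : ((i : Int) + 1) = ((i + 1 : Nat) : Int) := by push_cast; ring
  rw [h1, ← Int.natCast_mod]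

theorem pvLoopA_spec (n' : Nat) (hn : 1 ≤ n') (g : List Int) :
    ∀ (p : List Int) (i : Nat), p.length = n' → i < n' →
      (g.foldl (fun (st : List Int × Int) f =>
          (st.1.set st.2.toNat (((PySem.List.pyGet? st.1 st.2).getD 0) * f),
           PySem.Int.mod (st.2 + 1) (n' : Int)))
        (p, (i : Int))).1
      = (List.range n').map (fun j => p.getD j 0 * pvBp n' g i j) := by
  induction g with
  | nil =>
    intro p i hp hi
    simp only [List.foldl_nil]
    apply List.ext_getElem (by simp [hp])
    intro k h1 h2
    simp [pvBp, List.getD_eq_getElem?_getD, List.getElem?_eq_getElem h1]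
  | cons f g ih =>
    intro p i hp hi
    have hil : i < p.length := by omega
    have hget : PySem.List.pyGet? p (i : Int) = some p[i] := by
      simp [hil]
    simp only [List.foldl_cons, hget, Option.getD_some, Int.toNat_natCast, pvFmod_step i n' hn]
    rw [ih (p.set i (p[i] * f)) ((i + 1) % n') (by simp [hp]) (Nat.mod_lt _ (by omega))]
    apply List.map_congr_left
    intro j hj
    rw [List.mem_range] at hj
    have hjp : j < p.length := by omega
    by_cases hij : i = j
    · subst hij
      simp [List.getD_eq_getElem?_getD, pvBp, List.getElem?_set_self' (l := p),
        List.getElem?_eq_getElem hjp, mul_assoc]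
    · simp [List.getD_eq_getElem?_getD, pvBp, List.getElem?_set_ne (Ne.intro hij), hij]

theorem pvRange_nonpos (n : Int) (hn : n ≤ 0) : PySem.List.pyRange 0 n 1 = [] := by
  unfold PySem.List.pyRange
  split
  · rfl
  · split
    · simp; omega
    · omega

-- ===== VERDICT (by name: the statement is the Claim_ definition above) =====
theorem most_equal_products_spec : Claim_equal_most_equal_products := by
  unfold Claim_equal_most_equal_products
  intro factors n _ hpre
  unfold Spec_most_equal_products most_equal_products most_equal_products_alt
  by_cases hn : 1 ≤ n
  · -- main case: n ≥ 1
    obtain ⟨n', rfl⟩ : ∃ n' : Nat, n = (n' : Int) := ⟨n.toNat, by omega⟩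
    have hn' : 1 ≤ n' := by exact_mod_cast hn
    set g := PySem.List.sorted factors (fun x => x) with hg
    have hA := pvLoopA_spec n' hn' g (List.replicate n' 1) 0 (by simp) (by omega)
    simp only [Int.toNat_natCast, Nat.cast_zero] at hA ⊢
    rw [hA, PySem.List.pyRange_zero_natCast, List.map_map]
    apply List.map_congr_left
    intro j hj
    rw [List.mem_range] at hj
    have hB := pvStrideLoop_spec g n' hn' g.length j 1 (by omega)
    have hrep : (List.replicate n' (1 : Int)).getD j 0 = 1 := by
      rw [List.getD_eq_getElem?_getD, List.getElem?_replicate, if_pos hj]; rfl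
    simp only [Function.comp_apply, hB, one_mul, hrep]
    exact pvBp_eq_SP n' hn' g 0 j j (by omega) hj hj (Or.inl (by omega))
  · -- n ≤ 0: Pre_ forces factors = []; both sides are []
    have hfe : factors = [] := by
      cases hpre with
      | inl h => exact h
      | inr h => exact absurd h hn
    subst hfe
    have hnle : n ≤ 0 := by omega
    rw [pvRange_nonpos n hnle]
    simp only [PySem.List.sorted, List.foldl_nil, List.map_nil]
    simp
    omega
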